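-- pv_equiv track=rewrite | github.com/pglen/spellcrypt | spemod.py | ascsplit
-- ===== SOURCE A (Python) =====
-- import sys, string, os
--
-- printable = string.ascii_letters + "'"
--
-- def ascsplit(strx):
--     arr = [] ;  last = ""; cumm = ""; cumm2 = ""
--     mode = 0; old_mode = 0
--
--     for aa in strx:
--         if aa in printable:
--             mode = 0
--         else:
--             mode = 1
--
--         if mode == 0:
--             cumm += aa
--             if old_mode != mode:
--                 arr.append(cumm2)
--                 cumm2 = ""
--
--         if mode == 1:
--             cumm2 += aa
--             if old_mode != mode:
--                 arr.append(cumm)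
--                 cumm = ""
--         old_mode = mode
--
--     # Flush the rest, if any
--     if cumm2:
--         arr.append(cumm2)
--
--     if cumm:
--         arr.append(cumm)
--
--     return arr
-- ===== SOURCE B (Python) =====
-- import string
--
-- _P = frozenset(string.ascii_letters + "'")
--
--
-- def _span(s, pred):
--     """Split s into (longest prefix satisfying pred, remainder)."""
--     i = 0
--     while i < len(s) and pred(s[i]):
--         i += 1
--     return s[:i], s[i:]
--
--
-- def ascsplit(strx):
--     # Consume the string in (printable-run, non-printable-run) PAIRS, so the
--     # output alternates starting with a printable segment by construction;
--     # drop a trailing empty non-printable segment.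
--     out = []
--     rest = strx
--     while rest:
--         seg, rest = _span(rest, lambda c: c in _P)
--         gap, rest = _span(rest, lambda c: c not in _P)
--         out.append(seg)
--         out.append(gap)
--     if out and out[-1] == "":
--         out.pop()
--     return out
-- ===== Notes on version B (the rewrite author's own statement) =====
-- stated objective: alternative
-- what changed: Replaced A's char-by-char two-buffer mode state machine by a loop that consumes the string in (printable-run, non-printable-run) pairs via a span helper, appending both runs of each pair at once and popping a trailing empty segment; alternation starting with a printable segment arises by construction.
import Mathlib
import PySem

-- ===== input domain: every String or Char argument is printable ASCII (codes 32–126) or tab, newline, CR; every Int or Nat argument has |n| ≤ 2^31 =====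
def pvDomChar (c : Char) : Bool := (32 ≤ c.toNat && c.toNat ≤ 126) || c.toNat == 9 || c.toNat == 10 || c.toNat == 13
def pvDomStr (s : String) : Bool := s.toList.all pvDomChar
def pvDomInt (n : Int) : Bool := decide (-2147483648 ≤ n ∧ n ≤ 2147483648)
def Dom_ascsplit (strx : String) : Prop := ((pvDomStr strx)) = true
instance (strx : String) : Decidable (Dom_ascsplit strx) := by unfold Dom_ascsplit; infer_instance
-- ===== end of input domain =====

-- B replaces A's char-by-char two-buffer mode state machine by a loop that consumes
-- the string in (printable-run, non-printable-run) pairs via a span helper, popping a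
-- trailing empty segment; objective: alternative (same O(n) cost, different structure).

-- ===== PORT A =====
-- printable = string.ascii_letters + "'"
def pvPrintable : List Char :=
  "abcdefghijklmnopqrstuvwxyzABCDEFGHIJKLMNOPQRSTUVWXYZ'".toList

-- one iteration of A's for-loop; Python strings cumm/cumm2 are carried as List Char,
-- turned into String exactly where A appends them to arr
def ascsplitStep (st : List String × List Char × List Char × Int) (aa : Char) :
    List String × List Char × List Char × Int :=
  let mode : Int := if pvPrintable.contains aa then 0 else 1
  let st1 :=
    if mode == 0 then
      let cumm := st.2.1 ++ [aa]
      if st.2.2.2 != mode then (st.1 ++ [String.ofList st.2.2.1], cumm, ([] : List Char), mode)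
      else (st.1, cumm, st.2.2.1, mode)
    else (st.1, st.2.1, st.2.2.1, mode)
  if mode == 1 then
    let cumm2 := st1.2.2.1 ++ [aa]
    if st.2.2.2 != mode then (st1.1 ++ [String.ofList st1.2.1], ([] : List Char), cumm2, mode)
    else (st1.1, st1.2.1, cumm2, mode)
  else st1

def ascsplit (strx : String) : List String :=
  let st := strx.toList.foldl ascsplitStep ([], [], [], 0)
  let arr := if st.2.2.1 ≠ [] then st.1 ++ [String.ofList st.2.2.1] else st.1
  if st.2.1 ≠ [] then arr ++ [String.ofList st.2.1] else arr

-- ===== PORT B =====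
def pvIsPr (c : Char) : Bool := pvPrintable.contains c

-- port of Source B's _span helper: (longest prefix satisfying pred, remainder)
def pvSpan (p : Char → Bool) : List Char → List Char × List Char
  | [] => ([], [])
  | c :: cs => if p c then let r := pvSpan p cs; (c :: r.1, r.2) else ([], c :: cs)

theorem pvSpan_eq (p : Char → Bool) (l : List Char) :
    pvSpan p l = (l.takeWhile p, l.dropWhile p) := by
  induction l with
  | nil => rfl
  | cons c cs ih =>
    by_cases h : p c <;> simp [pvSpan, ih, List.takeWhile, List.dropWhile, h]

-- Source B's while loop: consume a (printable, non-printable) pair of runs each iteration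
def pvGo (l : List Char) : List String :=
  match l with
  | [] => []
  | c :: cs =>
    let s1 := pvSpan pvIsPr (c :: cs)
    let s2 := pvSpan (fun d => !pvIsPr d) s1.2
    String.ofList s1.1 :: String.ofList s2.1 :: pvGo s2.2
termination_by l.length
decreasing_by
  simp only [pvSpan_eq]
  by_cases h : pvIsPr c
  · calc (((c :: cs).dropWhile pvIsPr).dropWhile (fun d => !pvIsPr d)).length
        ≤ ((c :: cs).dropWhile pvIsPr).length := List.length_dropWhile_le _ _
      _ = (cs.dropWhile pvIsPr).length := by simp [List.dropWhile, h]
      _ ≤ cs.length := List.length_dropWhile_le _ _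
      _ < (c :: cs).length := by simp
  · calc (((c :: cs).dropWhile pvIsPr).dropWhile (fun d => !pvIsPr d)).length
        = (cs.dropWhile (fun d => !pvIsPr d)).length := by
          simp [List.dropWhile, h]
      _ ≤ cs.length := List.length_dropWhile_le _ _
      _ < (c :: cs).length := by simp

-- Source B's trailing pop: if out and out[-1] == "": out.pop()
def pvPopT (out : List String) : List String :=
  if out.getLast? = some "" then out.dropLast else out

def ascsplit_alt (strx : String) : List String :=
  pvPopT (pvGo strx.toList)

-- ===== PRECONDITION & SPEC =====
def Spec_ascsplit (strx : String) (out : List String) : Prop := out = ascsplit_alt strx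
instance (strx : String) (out : List String) : Decidable (Spec_ascsplit strx out) := by unfold Spec_ascsplit; infer_instance

-- ===== CLAIM (what is proved, stated in full; the proofs are below) =====
def Claim_equal_ascsplit : Prop := ∀ (strx : String), Dom_ascsplit strx → Spec_ascsplit strx (ascsplit strx)

-- ===== LEMMAS AND PROOFS =====

-- abbreviations for the proofs (A side)
def pvLoop (l : List Char) (st : List String × List Char × List Char × Int) :=
  l.foldl ascsplitStep st

def pvFlush (st : List String × List Char × List Char × Int) : List String :=
  let arr := if st.2.2.1 ≠ [] then st.1 ++ [String.ofList st.2.2.1] else st.1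
  if st.2.1 ≠ [] then arr ++ [String.ofList st.2.1] else arr

theorem pvLoop_cons (c : Char) (l : List Char) (st) :
    pvLoop (c :: l) st = pvLoop l (ascsplitStep st c) := rfl

-- single-step characterisations
theorem step_pr_same (c : Char) (h : pvIsPr c = true) (arr cumm cumm2) :
    ascsplitStep (arr, cumm, cumm2, (0 : Int)) c = (arr, cumm ++ [c], cumm2, 0) := by
  simp [ascsplitStep, pvIsPr] at h ⊢
  simp [h]

theorem step_pr_trans (c : Char) (h : pvIsPr c = true) (arr cumm cumm2) :
    ascsplitStep (arr, cumm, cumm2, (1 : Int)) c =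
      (arr ++ [String.ofList cumm2], cumm ++ [c], [], 0) := by
  simp [ascsplitStep, pvIsPr] at h ⊢
  simp [h]

theorem step_np_same (c : Char) (h : pvIsPr c = false) (arr cumm cumm2) :
    ascsplitStep (arr, cumm, cumm2, (1 : Int)) c = (arr, cumm, cumm2 ++ [c], 1) := by
  simp [ascsplitStep, pvIsPr] at h ⊢
  simp [h]

theorem step_np_trans (c : Char) (h : pvIsPr c = false) (arr cumm cumm2) :
    ascsplitStep (arr, cumm, cumm2, (0 : Int)) c =
      (arr ++ [String.ofList cumm], [], cumm2 ++ [c], 1) := by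
  simp [ascsplitStep, pvIsPr] at h ⊢
  simp [h]

-- a whole run of printable chars in mode 0 just extends cumm
theorem loop_run0 (l : List Char) (h : l.all pvIsPr) (arr cumm cumm2) :
    pvLoop l (arr, cumm, cumm2, 0) = (arr, cumm ++ l, cumm2, 0) := by
  induction l generalizing cumm with
  | nil => simp [pvLoop]
  | cons c cs ih =>
    simp only [List.all_cons, Bool.and_eq_true] at h
    rw [pvLoop_cons, step_pr_same c h.1, ih h.2]
    simp

-- a whole run of non-printable chars in mode 1 just extends cumm2
theorem loop_run1 (l : List Char) (h : l.all (fun c => !pvIsPr c)) (arr cumm cumm2) :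
    pvLoop l (arr, cumm, cumm2, 1) = (arr, cumm, cumm2 ++ l, 1) := by
  induction l generalizing cumm2 with
  | nil => simp [pvLoop]
  | cons c cs ih =>
    simp only [List.all_cons, Bool.and_eq_true, Bool.not_eq_true'] at h
    rw [pvLoop_cons, step_np_same c h.1, ih h.2]
    simp

-- proof-only description of both results: the maximal runs of equal printability
def pvGroups (l : List Char) : List (List Char) :=
  match l with
  | [] => []
  | c :: cs =>
    (c :: cs.takeWhile (fun d => pvIsPr d == pvIsPr c)) ::
      pvGroups (cs.dropWhile (fun d => pvIsPr d == pvIsPr c))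
termination_by l.length
decreasing_by
  simpa using Nat.lt_succ_of_le (List.length_dropWhile_le _ _)

theorem pvGroups_nil : pvGroups [] = [] := by rw [pvGroups]

theorem pvGroups_cons (c : Char) (cs : List Char) :
    pvGroups (c :: cs) =
      (c :: cs.takeWhile (fun d => pvIsPr d == pvIsPr c)) ::
        pvGroups (cs.dropWhile (fun d => pvIsPr d == pvIsPr c)) := by rw [pvGroups]

-- the common normal form both programs compute
def pvGB (l : List Char) : List String :=
  match l with
  | [] => []
  | c :: cs =>
    if pvIsPr c then (pvGroups (c :: cs)).map String.ofList
    else "" :: (pvGroups (c :: cs)).map String.ofList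

-- run-shaped unfoldings of pvGroups
theorem pvGroups_pr (c : Char) (cs : List Char) (hc : pvIsPr c = true) :
    pvGroups (c :: cs) =
      ((c :: cs).takeWhile pvIsPr) :: pvGroups ((c :: cs).dropWhile pvIsPr) := by
  rw [pvGroups_cons]
  simp [hc]

theorem pvGroups_np (c : Char) (cs : List Char) (hc : pvIsPr c = false) :
    pvGroups (c :: cs) =
      ((c :: cs).takeWhile (fun d => !pvIsPr d)) ::
        pvGroups ((c :: cs).dropWhile (fun d => !pvIsPr d)) := by
  rw [pvGroups_cons]
  simp [hc]

-- the two run-boundary invariants of A's loop, proved together by strong induction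
theorem main_inv (n : ℕ) : ∀ l : List Char, l.length ≤ n →
    (∀ arr cumm, (l = [] ∨ pvIsPr l.head! = false) →
      pvFlush (pvLoop l (arr, cumm, [], 0)) =
        arr ++ (if l = [] then (if cumm ≠ [] then [String.ofList cumm] else [])
                else String.ofList cumm :: (pvGroups l).map String.ofList)) ∧
    (∀ arr cumm2, cumm2 ≠ [] → (l = [] ∨ pvIsPr l.head! = true) →
      pvFlush (pvLoop l (arr, [], cumm2, 1)) =
        arr ++ String.ofList cumm2 :: (pvGroups l).map String.ofList) := by
  induction n with
  | zero =>
    intro l hl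
    have : l = [] := List.length_eq_zero_iff.mp (Nat.le_zero.mp hl)
    subst this
    constructor
    · intro arr cumm _
      simp [pvLoop, pvFlush]
      split_ifs <;> simp
    · intro arr cumm2 h2 _
      simp [pvLoop, pvFlush, h2, pvGroups_nil]
  | succ n ih =>
    intro l hl
    constructor
    · intro arr cumm hh
      cases l with
      | nil =>
        simp [pvLoop, pvFlush]
        split_ifs <;> simp
      | cons c cs =>
        simp only [List.head!_cons] at hh
        have hc : pvIsPr c = false := by tauto
        set p : Char → Bool := fun d => pvIsPr d == pvIsPr c with hp
        have hrun : (cs.takeWhile p).all (fun d => !pvIsPr d) := by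
          refine List.all_eq_true.mpr fun d hd => ?_
          have := List.mem_takeWhile_imp hd
          simp [hp, hc] at this
          simp [this]
        have hrest : cs.dropWhile p = [] ∨ pvIsPr (cs.dropWhile p).head! = true := by
          cases hdw : cs.dropWhile p with
          | nil => exact Or.inl rfl
          | cons d ds =>
            right
            have := List.head?_dropWhile_not (p := p) (l := cs)
            rw [hdw] at this
            simp [hp, hc] at this
            simpa using this
        have key : pvLoop (c :: cs) (arr, cumm, [], 0) =
            pvLoop (cs.dropWhile p) (arr ++ [String.ofList cumm], [], c :: cs.takeWhile p, 1) := by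
          rw [pvLoop_cons, step_np_trans c hc]
          conv_lhs => rw [show cs = cs.takeWhile p ++ cs.dropWhile p from
            (List.takeWhile_append_dropWhile).symm]
          rw [pvLoop, List.foldl_append, ← pvLoop, ← pvLoop, loop_run1 _ hrun,
            List.nil_append, List.singleton_append]
        have hlen : (cs.dropWhile p).length ≤ n := by
          have h1 := List.length_dropWhile_le p cs
          simp at hl; omega
        have h2 := (ih _ hlen).2 (arr ++ [String.ofList cumm]) (c :: cs.takeWhile p)
          (by simp) hrest
        rw [key, h2, pvGroups_cons]
        simp [hp]
    · intro arr cumm2 hne hh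
      cases l with
      | nil => simp [pvLoop, pvFlush, hne, pvGroups_nil]
      | cons c cs =>
        simp only [List.head!_cons] at hh
        have hc : pvIsPr c = true := by tauto
        set p : Char → Bool := fun d => pvIsPr d == pvIsPr c with hp
        have hrun : (cs.takeWhile p).all pvIsPr = true := by
          refine List.all_eq_true.mpr fun d hd => ?_
          have := List.mem_takeWhile_imp hd
          simp [hp, hc] at this
          simp [this]
        have hrest : cs.dropWhile p = [] ∨ pvIsPr (cs.dropWhile p).head! = false := by
          cases hdw : cs.dropWhile p with
          | nil => exact Or.inl rfl
          | cons d ds =>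
            right
            have := List.head?_dropWhile_not (p := p) (l := cs)
            rw [hdw] at this
            simp [hp, hc] at this
            simpa using this
        have key : pvLoop (c :: cs) (arr, [], cumm2, 1) =
            pvLoop (cs.dropWhile p) (arr ++ [String.ofList cumm2], c :: cs.takeWhile p, [], 0) := by
          rw [pvLoop_cons, step_pr_trans c hc]
          conv_lhs => rw [show cs = cs.takeWhile p ++ cs.dropWhile p from
            (List.takeWhile_append_dropWhile).symm]
          rw [pvLoop, List.foldl_append, ← pvLoop, ← pvLoop, loop_run0 _ hrun,
            List.nil_append, List.singleton_append]
        have hlen : (cs.dropWhile p).length ≤ n := by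
          have h1 := List.length_dropWhile_le p cs
          simp at hl; omega
        have h1 := (ih _ hlen).1 (arr ++ [String.ofList cumm2]) (c :: cs.takeWhile p) hrest
        rw [key, h1, pvGroups_cons, ← hp]
        rcases hrest with h | h
        · rw [if_pos h, h, pvGroups_nil]; simp
        · have hdw : cs.dropWhile p ≠ [] := by
            intro h0; rw [h0] at h; simp [pvIsPr, pvPrintable] at h
          rw [if_neg hdw]; simp

-- A computes the normal form
theorem A_eq_GB (strx : String) : ascsplit strx = pvGB strx.toList := by
  unfold ascsplit
  show pvFlush (pvLoop strx.toList ([], [], [], 0)) = _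
  cases hl : strx.toList with
  | nil => simp [pvLoop, pvFlush, pvGB]
  | cons c cs =>
    cases hc : pvIsPr c with
    | false =>
      have h0 := (main_inv (c :: cs).length (c :: cs) le_rfl).1 [] []
        (Or.inr (by simpa using hc))
      rw [h0]
      simp [pvGB, hc]
    | true =>
      set p : Char → Bool := fun d => pvIsPr d == pvIsPr c with hp
      have hrun : (cs.takeWhile p).all pvIsPr = true := by
        refine List.all_eq_true.mpr fun d hd => ?_
        have := List.mem_takeWhile_imp hd
        simp [hp, hc] at this
        simp [this]
      have hrest : cs.dropWhile p = [] ∨ pvIsPr (cs.dropWhile p).head! = false := by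
        cases hdw : cs.dropWhile p with
        | nil => exact Or.inl rfl
        | cons d ds =>
          right
          have := List.head?_dropWhile_not (p := p) (l := cs)
          rw [hdw] at this
          simp [hp, hc] at this
          simpa using this
      have key : pvLoop (c :: cs) ([], [], [], 0) =
          pvLoop (cs.dropWhile p) ([], c :: cs.takeWhile p, [], 0) := by
        rw [pvLoop_cons, step_pr_same c hc]
        conv_lhs => rw [show cs = cs.takeWhile p ++ cs.dropWhile p from
          (List.takeWhile_append_dropWhile).symm]
        rw [pvLoop, List.foldl_append, ← pvLoop, ← pvLoop, loop_run0 _ hrun,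
          List.nil_append, List.singleton_append]
      have h1 := (main_inv (cs.dropWhile p).length _ le_rfl).1 [] (c :: cs.takeWhile p) hrest
      rw [key, h1, show pvGB (c :: cs) = (pvGroups (c :: cs)).map String.ofList from by
        simp [pvGB, hc], pvGroups_cons, ← hp]
      simp only [List.nil_append]
      rcases hrest with h | h
      · rw [if_pos h, h, pvGroups_nil]; simp
      · have hdw : cs.dropWhile p ≠ [] := by
          intro h0; rw [h0] at h; simp [pvIsPr, pvPrintable] at h
        rw [if_neg hdw]; simp

-- B-side lemmas
theorem pvGo_cons (c : Char) (cs : List Char) :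
    pvGo (c :: cs) =
      String.ofList ((c :: cs).takeWhile pvIsPr) ::
      String.ofList (((c :: cs).dropWhile pvIsPr).takeWhile (fun d => !pvIsPr d)) ::
      pvGo (((c :: cs).dropWhile pvIsPr).dropWhile (fun d => !pvIsPr d)) := by
  rw [pvGo]
  simp [pvSpan_eq]

theorem pvGo_ne_nil (l : List Char) (h : l ≠ []) : pvGo l ≠ [] := by
  cases l with
  | nil => exact absurd rfl h
  | cons c cs => rw [pvGo_cons]; simp

theorem ofList_ne_empty (b : List Char) (h : b ≠ []) : String.ofList b ≠ "" := by
  intro he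
  apply h
  have := congrArg String.toList he
  rwa [String.toList_ofList] at this

theorem pvPopT_append (xs ys : List String) (h : ys ≠ []) :
    pvPopT (xs ++ ys) = xs ++ pvPopT ys := by
  unfold pvPopT
  rw [List.getLast?_append_of_ne_nil xs h]
  split_ifs with hl
  · rw [List.dropLast_append_of_ne_nil h]
  · rfl

-- B computes the normal form
theorem B_eq_GB (n : ℕ) : ∀ l : List Char, l.length ≤ n → pvPopT (pvGo l) = pvGB l := by
  induction n with
  | zero =>
    intro l hl
    have : l = [] := List.length_eq_zero_iff.mp (Nat.le_zero.mp hl)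
    subst this
    simp [pvGo, pvPopT, pvGB]
  | succ n ih =>
    intro l hl
    cases l with
    | nil => simp [pvGo, pvPopT, pvGB]
    | cons c cs =>
      rw [pvGo_cons]
      set r : List Char := (c :: cs).dropWhile pvIsPr with hr
      set a : List Char := (c :: cs).takeWhile pvIsPr with ha
      set b : List Char := r.takeWhile (fun d => !pvIsPr d) with hb
      set r2 : List Char := r.dropWhile (fun d => !pvIsPr d) with hr2
      by_cases hbe : b = []
      · -- then r = [], so the whole string is printable
        have hrnil : r = [] := by
          cases hrc : r with
          | nil => rfl
          | cons d ds =>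
            exfalso
            have hd : pvIsPr d = false := by
              have := List.head?_dropWhile_not (p := pvIsPr) (l := (c :: cs))
              rw [← hr, hrc] at this
              simpa using this
            rw [hb, hrc] at hbe
            simp [hd] at hbe
        have hr2nil : r2 = [] := by rw [hr2, hrnil]; rfl
        have hc : pvIsPr c = true := by
          by_contra hcf
          have : r = c :: cs := by
            rw [hr, List.dropWhile_cons_of_neg (by simpa using hcf)]
          rw [hrnil] at this
          simp at this
        have hal : a = c :: cs := by
          have := List.takeWhile_append_dropWhile (p := pvIsPr) (l := (c :: cs))
          rw [← ha, ← hr, hrnil, List.append_nil] at this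
          exact this
        rw [hbe, hr2nil]
        have hGB : pvGB (c :: cs) = (pvGroups (c :: cs)).map String.ofList := by
          simp [pvGB, hc]
        rw [hGB, pvGroups_pr c cs hc, ← ha, ← hr, hrnil, pvGroups_nil]
        simp [pvGo, pvPopT]
      · -- b ≠ []: a pair of runs is emitted, recurse on the rest
        have hBne : String.ofList b ≠ "" := ofList_ne_empty b hbe
        have hmap : (pvGroups r2).map String.ofList = pvGB r2 := by
          cases hrc : r2 with
          | nil => simp [pvGroups_nil, pvGB]
          | cons d ds =>
            have hd : pvIsPr d = true := by
              have := List.head?_dropWhile_not (p := fun d => !pvIsPr d) (l := r)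
              rw [← hr2, hrc] at this
              simpa using this
            simp [pvGB, hd]
        have hlhs : pvPopT (String.ofList a :: String.ofList b :: pvGo r2)
            = String.ofList a :: String.ofList b :: pvPopT (pvGo r2) := by
          by_cases hz : r2 = []
          · rw [hz]
            simp [pvGo, pvPopT, hBne]
          · have := pvPopT_append [String.ofList a, String.ofList b] (pvGo r2)
              (pvGo_ne_nil r2 hz)
            simpa using this
        rw [hlhs]
        have hlen : r2.length ≤ n := by
          have hb2 : r2.length ≤ cs.length := by
            by_cases hc : pvIsPr c
            · have h1 : r.length ≤ cs.length := by
                rw [hr, List.dropWhile_cons_of_pos (by simpa using hc)]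
                exact List.length_dropWhile_le _ _
              exact le_trans (by rw [hr2]; exact List.length_dropWhile_le _ _) h1
            · rw [hr2, hr, List.dropWhile_cons_of_neg (by simpa using hc),
                List.dropWhile_cons_of_pos (by simpa using hc)]
              exact List.length_dropWhile_le _ _
          simp at hl; omega
        rw [ih r2 hlen, ← hmap]
        by_cases hc : pvIsPr c
        · have hrg : pvGroups r = b :: pvGroups r2 := by
            cases hrc : r with
            | nil => exfalso; apply hbe; rw [hb, hrc]; rfl
            | cons d ds =>
              have hd : pvIsPr d = false := by
                have := List.head?_dropWhile_not (p := pvIsPr) (l := (c :: cs))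
                rw [← hr, hrc] at this
                simpa using this
              rw [pvGroups_np d ds hd, ← hrc, ← hb, ← hr2]
          have hGB : pvGB (c :: cs) = (pvGroups (c :: cs)).map String.ofList := by
            simp [pvGB, hc]
          rw [hGB, pvGroups_pr c cs hc, ← ha, ← hr, hrg]
          simp
        · have hcf : pvIsPr c = false := by simpa using hc
          have hanil : a = [] := by
            rw [ha, List.takeWhile_cons_of_neg (by simpa using hcf)]
          have hR : r = c :: cs := by
            rw [hr, List.dropWhile_cons_of_neg (by simpa using hcf)]
          have hrl : (c :: cs).dropWhile (fun d => !pvIsPr d) = r2 := by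
            rw [hr2, hR]
          have hbl : (c :: cs).takeWhile (fun d => !pvIsPr d) = b := by
            rw [hb, hR]
          have hGB : pvGB (c :: cs) = "" :: (pvGroups (c :: cs)).map String.ofList := by
            simp [pvGB, hcf]
          rw [hGB, pvGroups_np c cs hcf, hbl, hrl, hanil]
          simp

-- ===== VERDICT (by name: the statement is the Claim_ definition above) =====
theorem ascsplit_spec : Claim_equal_ascsplit := by
  intro strx _
  unfold Spec_ascsplit ascsplit_alt
  rw [A_eq_GB, (B_eq_GB strx.toList.length strx.toList le_rfl)]
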